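-- pv_equiv track=rewrite | github.com/prasadshirvandkar/Competitive_Prep | src/pythoncodes/test.py | parts_of_parts_rec
-- ===== SOURCE A (Python) =====
-- def parts_of_parts_recursive(prod, total_parts, parts):
--     if prod in parts:
--         part = parts[prod]
--         if len(part) == 0:
--             total_parts.append(prod)
--             return
--
--         for i in range(len(part)):
--             parts_of_parts_recursive(part[i], total_parts, parts)
--
--     return
--
-- def parts_of_parts_rec(prod):
--     parts = {
--         'A': ['B', 'B', 'C'],
--         'B': [],
--         'C': ['D', 'E', 'F'],
--         'D': [],
--         'E': ['B', 'D'],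
--         'F': []
--     }
--     total_parts = []
--     parts_of_parts_recursive(prod, total_parts, parts)
--     total_parts_map = dict()
--     for t in total_parts:
--         total_parts_map[t] = total_parts_map.get(t, 0) + 1
--
--     return total_parts_map
-- ===== SOURCE B (Python) =====
-- def parts_of_parts_rec(prod):
--     parts = {
--         'A': ['B', 'B', 'C'],
--         'B': [],
--         'C': ['D', 'E', 'F'],
--         'D': [],
--         'E': ['B', 'D'],
--         'F': []
--     }
--     counts = {}
--     stack = [prod]
--     while stack:
--         node = stack.pop()
--         children = parts.get(node)
--         if children is None:
--             continue
--         if children: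
--             stack.extend(reversed(children))
--         else:
--             counts[node] = counts.get(node, 0) + 1
--     return counts
-- ===== Notes on version B (the rewrite author's own statement) =====
-- stated objective: alternative
-- what changed: Replaces the recursive leaf-collecting helper plus a separate counting pass with a single explicit-stack traversal that tallies leaf counts directly during the walk.
import Mathlib
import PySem

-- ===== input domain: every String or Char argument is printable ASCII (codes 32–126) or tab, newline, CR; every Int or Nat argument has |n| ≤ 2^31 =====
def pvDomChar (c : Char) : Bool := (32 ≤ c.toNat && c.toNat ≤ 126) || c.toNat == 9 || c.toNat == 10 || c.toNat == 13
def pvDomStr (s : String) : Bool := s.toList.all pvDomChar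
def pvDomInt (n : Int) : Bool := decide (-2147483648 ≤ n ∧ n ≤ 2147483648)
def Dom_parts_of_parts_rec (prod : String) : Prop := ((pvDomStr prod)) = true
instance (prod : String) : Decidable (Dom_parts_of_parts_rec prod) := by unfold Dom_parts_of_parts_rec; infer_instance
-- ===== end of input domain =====

-- B replaces A's recursive leaf-collection + separate counting pass with one explicit-stack
-- traversal that tallies counts directly (objective: alternative decomposition, same cost).

-- ===== PORT A =====
-- the fixed 'parts' dict of A (B builds the same literal)
def pvPartsDict : PySem.Dict String (List String) :=
  PySem.Dict.ofList [("A", ["B", "B", "C"]), ("B", []), ("C", ["D", "E", "F"]),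
                     ("D", []), ("E", ["B", "D"]), ("F", [])]

-- parts_of_parts_recursive: 'total_parts' is threaded as the accumulator; the Python recursion
-- always terminates (the fixed graph is acyclic, depth ≤ 4), so fuel 8 never runs out on any input.
def pvRecA (fuel : Nat) (prod : String) (total_parts : List String)
    (parts : PySem.Dict String (List String)) : List String :=
  match fuel with
  | 0 => total_parts
  | fuel + 1 =>
    match parts.get? prod with
    | none => total_parts
    | some part =>
      if part.length = 0 then total_parts ++ [prod]
      else part.foldl (fun acc c => pvRecA fuel c acc parts) total_parts

def parts_of_parts_rec (prod : String) : List (String × Int) :=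
  let parts := pvPartsDict
  let total_parts := pvRecA 8 prod [] parts
  let total_parts_map :=
    total_parts.foldl (fun m t => m.insert t (m.getD t 0 + 1))
      (PySem.Dict.empty : PySem.Dict String Int)
  total_parts_map.items

-- ===== PORT B =====
-- while-loop of Source B; the Lean list head is the Python list's end (pop = head, extend(reversed(cs))
-- = cs ++ rest).  Each run pops at most 9 nodes, so fuel 32 never runs out on any input.
def pvLoopB (fuel : Nat) (stack : List String) (counts : PySem.Dict String Int)
    (parts : PySem.Dict String (List String)) : PySem.Dict String Int :=
  match fuel, stack with
  | _, [] => counts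
  | 0, _ => counts
  | fuel + 1, node :: rest =>
    match parts.get? node with
    | none => pvLoopB fuel rest counts parts
    | some children =>
      if children.isEmpty then
        pvLoopB fuel rest (counts.insert node (counts.getD node 0 + 1)) parts
      else pvLoopB fuel (children ++ rest) counts parts

def parts_of_parts_rec_alt (prod : String) : List (String × Int) :=
  let parts := pvPartsDict
  (pvLoopB 32 [prod] (PySem.Dict.empty : PySem.Dict String Int) parts).items

-- ===== PRECONDITION & SPEC =====
def Spec_parts_of_parts_rec (prod : String) (out : List (String × Int)) : Prop := out = parts_of_parts_rec_alt prod
instance (prod : String) (out : List (String × Int)) : Decidable (Spec_parts_of_parts_rec prod out) := by unfold Spec_parts_of_parts_rec; infer_instance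

-- ===== CLAIM (what is proved, stated in full; the proofs are below) =====
def Claim_equal_parts_of_parts_rec : Prop := ∀ (prod : String), Dom_parts_of_parts_rec prod → Spec_parts_of_parts_rec prod (parts_of_parts_rec prod)

-- ===== LEMMAS AND PROOFS =====

-- when prod is none of the six keys, the dict lookup fails
lemma pvPartsDict_get?_none (prod : String)
    (hA : prod ≠ "A") (hB : prod ≠ "B") (hC : prod ≠ "C")
    (hD : prod ≠ "D") (hE : prod ≠ "E") (hF : prod ≠ "F") :
    pvPartsDict.get? prod = none := by
  have h : pvPartsDict = PySem.Dict.mk [("A", ["B", "B", "C"]), ("B", []), ("C", ["D", "E", "F"]),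
      ("D", []), ("E", ["B", "D"]), ("F", [])] := by rfl
  rw [h]
  simp [PySem.Dict.get?, Ne.symm hA, Ne.symm hB, Ne.symm hC, Ne.symm hD, Ne.symm hE, Ne.symm hF]

theorem parts_of_parts_rec_key (prod : String) :
    parts_of_parts_rec prod = parts_of_parts_rec_alt prod := by
  by_cases hA : prod = "A"; · subst hA; rfl
  by_cases hB : prod = "B"; · subst hB; rfl
  by_cases hC : prod = "C"; · subst hC; rfl
  by_cases hD : prod = "D"; · subst hD; rfl
  by_cases hE : prod = "E"; · subst hE; rfl
  by_cases hF : prod = "F"; · subst hF; rfl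
  have h := pvPartsDict_get?_none prod hA hB hC hD hE hF
  simp [parts_of_parts_rec, parts_of_parts_rec_alt, pvRecA, pvLoopB, h]

-- ===== VERDICT (by name: the statement is the Claim_ definition above) =====
theorem parts_of_parts_rec_spec : Claim_equal_parts_of_parts_rec := by
  intro prod _
  exact parts_of_parts_rec_key prod
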